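-- pv_equiv track=rewrite | github.com/inducer/pytools | pytools/__init__.py | generate_nonnegative_integer_tuples_summing_to_at_most
-- ===== SOURCE A (Python) =====
-- def generate_nonnegative_integer_tuples_summing_to_at_most(n, length):
--     """Enumerate all non-negative integer tuples summing to at most n,
--     exhausting the search space by varying the first entry fastest,
--     and the last entry the slowest.
--     """
--     assert length >= 0
--     if length == 0:
--         yield ()
--     else:
--         for i in range(n+1):
--             for remainder in generate_nonnegative_integer_tuples_summing_to_at_most(
--                     n-i, length-1):
--                 yield (*remainder, i)
-- ===== SOURCE B (Python) =====
-- def generate_nonnegative_integer_tuples_summing_to_at_most(n, length):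
--     """Iterative mixed-radix odometer: keep the current tuple and its running
--     sum; advance by incrementing the lowest position that keeps the sum <= n,
--     zeroing the positions below it (first coordinate varies fastest)."""
--     assert length >= 0
--     if length == 0:
--         yield ()
--         return
--     if n < 0:
--         return
--     t = [0] * length
--     s = 0
--     while True:
--         yield tuple(t)
--         pos = 0
--         while pos < length and s >= n:
--             s -= t[pos]
--             t[pos] = 0
--             pos += 1
--         if pos == length:
--             return
--         t[pos] += 1
--         s += 1
-- ===== Notes on version B (the rewrite author's own statement) =====
-- stated objective: alternative
-- what changed: Replaces A's recursive generator (one recursion level per tuple position, rebuilding every tuple from nested remainders) by an iterative mixed-radix odometer that keeps one current tuple and its running sum and advances it in place, carrying into higher positions when the running sum would exceed n.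
import Mathlib
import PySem

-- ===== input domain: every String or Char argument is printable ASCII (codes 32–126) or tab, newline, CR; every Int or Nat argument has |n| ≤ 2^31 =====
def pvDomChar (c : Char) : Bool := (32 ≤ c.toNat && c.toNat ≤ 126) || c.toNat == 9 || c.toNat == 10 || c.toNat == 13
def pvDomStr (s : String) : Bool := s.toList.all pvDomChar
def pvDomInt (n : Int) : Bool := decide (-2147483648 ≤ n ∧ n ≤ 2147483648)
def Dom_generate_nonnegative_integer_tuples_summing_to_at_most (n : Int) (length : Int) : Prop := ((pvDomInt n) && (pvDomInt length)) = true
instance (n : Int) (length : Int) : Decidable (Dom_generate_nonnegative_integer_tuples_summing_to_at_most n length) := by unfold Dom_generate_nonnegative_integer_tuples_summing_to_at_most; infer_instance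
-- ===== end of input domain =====

-- B replaces A's recursive generator by an iterative mixed-radix odometer over the
-- current tuple with a running sum (objective: alternative; same output order).

-- ===== PORT A =====
-- A is a generator; the port returns the list of yielded tuples, recursing on the
-- tuple length exactly as A does (the assert `length >= 0` is Pre_).
def pvGenAuxA : Int → Nat → List (List Int)
  | _, 0 => [[]]
  | n, l + 1 =>
      (PySem.List.pyRange 0 (n + 1) 1).flatMap
        (fun i => (pvGenAuxA (n - i) l).map (fun r => r ++ [i]))

def generate_nonnegative_integer_tuples_summing_to_at_most (n : Int) (length : Int) : List (List Int) :=
  pvGenAuxA n length.toNat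

-- ===== PORT B =====
-- Python B's inner `while pos < length and s >= n` carry loop, as structural
-- recursion over the tuple; the state is (tuple, running sum), exactly as in Source B.
-- Returns `none` when the carry runs past the last position (pos == length).
def pvStep (n : Int) : List Int → Int → Option (List Int × Int)
  | [], _ => none
  | x :: rest, s =>
      if s < n then some ((x + 1) :: rest, s + 1)
      else Option.map (fun p : List Int × Int => (0 :: p.1, p.2)) (pvStep n rest (s - x))

-- Python B's outer `while True` loop: yield the tuple, then advance or stop.
-- `fuel` is only a totality guard; B's chosen fuel is never exhausted.
def pvRun (n : Int) : Nat → List Int → Int → List (List Int)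
  | 0, _, _ => []
  | fuel + 1, t, s =>
      t :: (match pvStep n t s with
            | none => []
            | some (t', s') => pvRun n fuel t' s')

def generate_nonnegative_integer_tuples_summing_to_at_most_alt (n : Int) (length : Int) : List (List Int) :=
  if length = 0 then [[]]
  else if n < 0 then []
  else pvRun n ((n.toNat + 1) ^ length.toNat) (List.replicate length.toNat 0) 0

-- ===== PRECONDITION & SPEC =====
-- A asserts `length >= 0` (AssertionError otherwise): exactly those inputs are excluded.
def Pre_generate_nonnegative_integer_tuples_summing_to_at_most (n : Int) (length : Int) : Prop := 0 ≤ length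
instance (n : Int) (length : Int) : Decidable (Pre_generate_nonnegative_integer_tuples_summing_to_at_most n length) := by unfold Pre_generate_nonnegative_integer_tuples_summing_to_at_most; infer_instance
def pvWitness_generate_nonnegative_integer_tuples_summing_to_at_most : Int × Int := (3, 2)
def Spec_generate_nonnegative_integer_tuples_summing_to_at_most (n : Int) (length : Int) (out : List (List Int)) : Prop := out = generate_nonnegative_integer_tuples_summing_to_at_most_alt n length
instance (n : Int) (length : Int) (out : List (List Int)) : Decidable (Spec_generate_nonnegative_integer_tuples_summing_to_at_most n length out) := by unfold Spec_generate_nonnegative_integer_tuples_summing_to_at_most; infer_instance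

-- ===== CLAIM (what is proved, stated in full; the proofs are below) =====
def Claim_equal_generate_nonnegative_integer_tuples_summing_to_at_most : Prop := ∀ (n : Int) (length : Int), Dom_generate_nonnegative_integer_tuples_summing_to_at_most n length → Pre_generate_nonnegative_integer_tuples_summing_to_at_most n length → Spec_generate_nonnegative_integer_tuples_summing_to_at_most n length (generate_nonnegative_integer_tuples_summing_to_at_most n length)

-- ===== LEMMAS AND PROOFS =====

-- A's recursion on a negative budget with positive length yields nothing.
theorem pvGenAuxA_neg (n : Int) (l : Nat) (hn : n < 0) :
    pvGenAuxA n (l + 1) = [] := by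
  simp [pvGenAuxA, PySem.List.pyRange_one_eq_nil (by omega : n + 1 ≤ 0)]

-- every tuple A yields for length l has l entries
theorem pvGenAuxA_length (l : Nat) : ∀ (n : Int), ∀ t ∈ pvGenAuxA n l, t.length = l := by
  induction l with
  | zero => intro n t ht; simp [pvGenAuxA] at ht; simp [ht]
  | succ l ih =>
      intro n t ht
      simp only [pvGenAuxA, List.mem_flatMap, List.mem_map] at ht
      obtain ⟨i, _, r, hr, rfl⟩ := ht
      simp [ih (n - i) r hr]

-- the odometer step on `t ++ [i]` in terms of the step on `t` with budget n - i
theorem pvStep_append (n i : Int) (t : List Int) :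
    pvStep n (t ++ [i]) (t.sum + i) =
      match pvStep (n - i) t t.sum with
      | some (t', s') => some (t' ++ [i], s' + i)
      | none => if i < n then some (List.replicate t.length 0 ++ [i + 1], i + 1) else none := by
  induction t with
  | nil =>
      have L : pvStep n ([] ++ [i]) (List.sum ([] : List Int) + i)
          = if (0 : Int) + i < n then some ([i + 1], 0 + i + 1)
            else Option.map (fun p : List Int × Int => (0 :: p.1, p.2))
                   (pvStep n [] (0 + i - i)) := rfl
      rw [L]
      by_cases h : i < n
      · rw [if_pos (by omega)]
        simp [pvStep, h]
      · rw [if_neg (by omega)]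
        simp [pvStep, h]
  | cons x rest ih =>
      have L : pvStep n ((x :: rest) ++ [i]) ((x :: rest).sum + i)
          = if x + rest.sum + i < n
            then some ((x + 1) :: (rest ++ [i]), x + rest.sum + i + 1)
            else Option.map (fun p : List Int × Int => (0 :: p.1, p.2))
                   (pvStep n (rest ++ [i]) (x + rest.sum + i - x)) := by
        simp only [List.cons_append, List.sum_cons]; rfl
      have R : pvStep (n - i) (x :: rest) ((x :: rest).sum)
          = if x + rest.sum < n - i then some ((x + 1) :: rest, x + rest.sum + 1)
            else Option.map (fun p : List Int × Int => (0 :: p.1, p.2))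
                   (pvStep (n - i) rest (x + rest.sum - x)) := by
        simp only [List.sum_cons]; rfl
      rw [L, R, show x + rest.sum + i - x = rest.sum + i by ring,
          show x + rest.sum - x = rest.sum by ring, ih]
      by_cases h1 : x + rest.sum + i < n
      · rw [if_pos h1, if_pos (by omega : x + rest.sum < n - i)]
        simp only [List.cons_append, Option.some.injEq, Prod.mk.injEq, true_and]
        ring
      · rw [if_neg h1, if_neg (by omega : ¬ x + rest.sum < n - i)]
        cases hs : pvStep (n - i) rest rest.sum with
        | none =>
            by_cases h2 : i < n <;>
              simp [h2, List.replicate_succ]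
        | some p => cases p with | mk t' s' => simp

-- the step relation the odometer follows between consecutive yielded tuples
def pvR (n : Int) (a b : List Int) : Prop := pvStep n a a.sum = some (b, b.sum)

-- Characterisation of A's output as an odometer run: nonempty, starts at the all-zeros
-- tuple, consecutive elements are related by the step, and the step fails on the last.
theorem pvGenAuxA_run (l : Nat) (n : Int) (hn : 0 ≤ n) :
    (pvGenAuxA n l).head? = some (List.replicate l 0) ∧
    List.IsChain (pvR n) (pvGenAuxA n l) ∧
    (∀ a, (pvGenAuxA n l).getLast? = some a → pvStep n a a.sum = none) := by
  induction l generalizing n hn with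
  | zero =>
      refine ⟨by simp [pvGenAuxA], by simp [pvGenAuxA], ?_⟩
      intro a ha
      have ha' : a = [] := by simpa [pvGenAuxA] using ha.symm
      subst ha'
      rfl
  | succ l ih =>
      -- downward induction over the outer range: the tail of the range starting at i
      -- produces a run whose head is (replicate l 0) ++ [i]
      have seg : ∀ (k : Nat) (i : Int), 0 ≤ i → i = n - k →
          (((PySem.List.pyRange i (n + 1) 1).flatMap
              (fun j => (pvGenAuxA (n - j) l).map (fun r => r ++ [j]))).head?
             = some (List.replicate l 0 ++ [i])) ∧
          List.IsChain (pvR n) ((PySem.List.pyRange i (n + 1) 1).flatMap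
              (fun j => (pvGenAuxA (n - j) l).map (fun r => r ++ [j]))) ∧
          (∀ a, ((PySem.List.pyRange i (n + 1) 1).flatMap
              (fun j => (pvGenAuxA (n - j) l).map (fun r => r ++ [j]))).getLast? = some a →
              pvStep n a a.sum = none) := by
        intro k
        induction k with
        | zero =>
            intro i hi0 hik
            rw [PySem.List.pyRange_one_cons (by omega : i < n + 1),
                PySem.List.pyRange_one_eq_nil (by omega : n + 1 ≤ i + 1)]
            obtain ⟨ihh, ihc, ihl⟩ := ih (n - i) (by omega)
            constructor
            · rw [List.flatMap_cons, List.flatMap_nil, List.append_nil,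
                  List.head?_map, ihh]
              rfl
            · -- chain within the single segment
              constructor
              · rw [List.flatMap_cons, List.flatMap_nil, List.append_nil, List.isChain_map]
                apply List.IsChain.imp ?_ ihc
                intro a b hab
                have ha : a.sum ≤ a.sum := le_refl _
                unfold pvR at hab ⊢
                have := pvStep_append n i a
                rw [hab] at this
                simpa [List.sum_append] using this
              · intro a ha
                simp only [List.flatMap_cons, List.flatMap_nil, List.append_nil] at ha
                rw [List.getLast?_map] at ha
                cases hg : (pvGenAuxA (n - i) l).getLast? with
                | none => rw [hg] at ha; simp at ha
                | some r =>
                    rw [hg] at ha; simp at ha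
                    have hnone := ihl r hg
                    have := pvStep_append n i r
                    rw [hnone] at this
                    rw [if_neg (by omega : ¬ i < n)] at this
                    rw [← ha]
                    simpa [List.sum_append] using this
        | succ k ihk =>
            intro i hi0 hik
            have hilt : i < n := by omega
            rw [PySem.List.pyRange_one_cons (by omega), List.flatMap_cons]
            obtain ⟨ihh, ihc, ihl⟩ := ih (n - i) (by omega)
            obtain ⟨resth, restc, restl⟩ := ihk (i + 1) (by omega) (by omega)
            -- the current segment is nonempty with the right head
            have hseghead : ((pvGenAuxA (n - i) l).map (fun r => r ++ [i])).head?
                = some (List.replicate l 0 ++ [i]) := by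
              rw [List.head?_map, ihh]; rfl
            constructor
            · rw [List.head?_append_of_ne_nil]
              · exact hseghead
              · intro hnil
                rw [hnil] at hseghead; simp at hseghead
            constructor
            · rw [List.isChain_append]
              refine ⟨?_, restc, ?_⟩
              · rw [List.isChain_map]
                apply List.IsChain.imp ?_ ihc
                intro a b hab
                unfold pvR at hab ⊢
                have := pvStep_append n i a
                rw [hab] at this
                simpa [List.sum_append] using this
              · -- glue: last of this segment steps to head of the rest
                intro a ha b hb
                rw [List.getLast?_map] at ha
                cases hg : (pvGenAuxA (n - i) l).getLast? with
                | none => rw [hg] at ha; simp at ha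
                | some r =>
                    rw [hg] at ha; simp at ha
                    have hnone := ihl r hg
                    have hstep := pvStep_append n i r
                    rw [hnone, if_pos hilt] at hstep
                    rw [resth] at hb
                    have hrlen : r.length = l := by
                      apply pvGenAuxA_length l (n - i)
                      exact List.mem_of_getLast? hg
                    unfold pvR
                    rw [← ha]
                    have hb' : b = List.replicate l 0 ++ [i + 1] := by
                      simpa [eq_comm] using hb
                    subst hb'
                    rw [List.sum_append, List.sum_append]
                    simpa [hrlen, List.sum_replicate] using hstep
            · intro a ha
              rw [List.getLast?_append] at ha
              cases hr : ((PySem.List.pyRange (i + 1) (n + 1) 1).flatMap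
                  (fun j => (pvGenAuxA (n - j) l).map (fun r => r ++ [j]))).getLast? with
              | some b =>
                  rw [hr] at ha
                  simp at ha
                  exact restl a (by rw [hr, ha])
              | none =>
                  -- the rest is nonempty (its head? is some), contradiction
                  exfalso
                  have : ((PySem.List.pyRange (i + 1) (n + 1) 1).flatMap
                      (fun j => (pvGenAuxA (n - j) l).map (fun r => r ++ [j]))) = [] :=
                    List.getLast?_eq_none_iff.mp hr
                  rw [this] at resth
                  simp at resth
      have := seg n.toNat 0 (le_refl 0) (by omega)
      rw [pvGenAuxA]
      refine ⟨?_, this.2.1, this.2.2⟩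
      rw [this.1]
      simp [List.replicate_succ' ]

-- the run list of length bound: fuel (n+1)^l suffices
theorem pvGenAuxA_card (l : Nat) (n : Int) :
    (pvGenAuxA n l).length ≤ (n.toNat + 1) ^ l := by
  induction l generalizing n with
  | zero => simp [pvGenAuxA]
  | succ l ih =>
      rw [pvGenAuxA]
      rw [List.length_flatMap]
      calc ((PySem.List.pyRange 0 (n + 1) 1).map
              (fun i => ((pvGenAuxA (n - i) l).map (fun r => r ++ [i])).length)).sum
          ≤ ((PySem.List.pyRange 0 (n + 1) 1).map (fun _ => (n.toNat + 1) ^ l)).sum := by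
            apply List.sum_le_sum
            intro i hi
            simp only [List.length_map]
            calc (pvGenAuxA (n - i) l).length ≤ ((n - i).toNat + 1) ^ l := ih (n - i)
              _ ≤ (n.toNat + 1) ^ l := by
                    apply Nat.pow_le_pow_left
                    have : 0 ≤ i := (PySem.List.mem_pyRange_one.mp hi).1
                    omega
        _ ≤ (n.toNat + 1) ^ (l + 1) := by
            rw [List.map_const', List.sum_replicate, smul_eq_mul]
            rw [PySem.List.length_pyRange_one]
            rw [pow_succ]
            have h2 : (n + 1 - 0).toNat ≤ n.toNat + 1 := by omega
            calc (n + 1 - 0).toNat * (n.toNat + 1) ^ l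
                ≤ (n.toNat + 1) * (n.toNat + 1) ^ l := Nat.mul_le_mul_right _ h2
              _ = (n.toNat + 1) ^ l * (n.toNat + 1) := mul_comm _ _

-- a chain with failing step at the end is reproduced by the fueled outer loop
theorem pvRun_of_chain (n : Int) (L : List (List Int)) (fuel : Nat)
    (hc : List.IsChain (pvR n) L)
    (hl : ∀ a, L.getLast? = some a → pvStep n a a.sum = none)
    (hf : L.length ≤ fuel) :
    ∀ t, L.head? = some t → pvRun n fuel t t.sum = L := by
  induction L generalizing fuel with
  | nil => intro t ht; simp at ht
  | cons a L ihL =>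
      intro t ht
      simp only [List.head?_cons, Option.some.injEq] at ht
      subst ht
      obtain ⟨fuel, rfl⟩ : ∃ f, fuel = f + 1 := by
        cases fuel with
        | zero => simp at hf
        | succ f => exact ⟨f, rfl⟩
      rw [pvRun]
      cases L with
      | nil =>
          rw [hl a (by simp)]
      | cons b L' =>
          have hab : pvR n a b := (List.isChain_cons_cons.mp hc).1
          unfold pvR at hab
          rw [hab]
          have hf' : (b :: L').length ≤ fuel := by
            simp only [List.length_cons] at hf ⊢; omega
          have hl' : ∀ a, (b :: L').getLast? = some a → pvStep n a a.sum = none := by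
            intro a ha
            exact hl a (by rw [List.getLast?_cons_cons]; exact ha)
          show a :: pvRun n fuel b b.sum = a :: b :: L'
          rw [ihL fuel (List.isChain_cons_cons.mp hc).2 hl' hf' b (by simp)]

-- ===== VERDICT (by name: the statement is the Claim_ definition above) =====
theorem generate_nonnegative_integer_tuples_summing_to_at_most_spec : Claim_equal_generate_nonnegative_integer_tuples_summing_to_at_most := by
  intro n length hdom hpre
  have hpre' : (0 : Int) ≤ length := hpre
  unfold Spec_generate_nonnegative_integer_tuples_summing_to_at_most
  unfold generate_nonnegative_integer_tuples_summing_to_at_most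
  unfold generate_nonnegative_integer_tuples_summing_to_at_most_alt
  by_cases hl : length = 0
  · subst hl; simp [pvGenAuxA]
  · have hlen : length.toNat = (length.toNat - 1) + 1 := by omega
    simp only [if_neg hl]
    by_cases hn : n < 0
    · rw [if_pos hn, hlen, pvGenAuxA_neg n _ hn]
    · rw [if_neg hn]
      obtain ⟨hh, hc, hlast⟩ := pvGenAuxA_run length.toNat n (by omega)
      have hz : (List.replicate length.toNat (0 : Int)).sum = 0 := by
        simp [List.sum_replicate]
      have hrun := pvRun_of_chain n (pvGenAuxA n length.toNat) _ hc hlast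
        (pvGenAuxA_card length.toNat n) _ hh
      rw [hz] at hrun
      exact hrun.symm
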